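-- pv_equiv track=rewrite | github.com/whetstoneresearch/doppler | scripts/split_hex.py | split_hex_to_words
-- ===== SOURCE A (Python) =====
-- def split_hex_to_words(hex_input):
--     """
--     Split a hex string into 256-bit (32-byte) words.
--
--     Args:
--         hex_input: Hex string with or without 0x prefix
--
--     Returns:
--         List of 256-bit words as hex strings
--     """
--     # Remove 0x prefix if present
--     if hex_input.startswith('0x'):
--         hex_input = hex_input[2:]
--
--     # Ensure even number of characters
--     if len(hex_input) % 2:
--         hex_input = '0' + hex_input
--
--     # Each word is 64 hex characters (32 bytes = 256 bits)
--     word_size = 64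
--     words = []
--
--     # Split into words
--     for i in range(0, len(hex_input), word_size):
--         word = hex_input[i:i + word_size]
--         # Pad last word if necessary
--         if len(word) < word_size:
--             word = word.ljust(word_size, '0')
--         words.append('0x' + word)
--
--     return words
-- ===== SOURCE B (Python) =====
-- def split_hex_to_words(hex_input):
--     # Single streaming pass over the characters: accumulate into a buffer,
--     # flush a word every 64 chars; pad and flush the leftover buffer at the end.
--     if hex_input.startswith('0x'):
--         hex_input = hex_input[2:]
--     if len(hex_input) % 2:
--         hex_input = '0' + hex_input
--     words = []
--     buf = []
--     for ch in hex_input: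
--         buf.append(ch)
--         if len(buf) == 64:
--             words.append('0x' + ''.join(buf))
--             buf = []
--     if buf:
--         words.append('0x' + ''.join(buf) + '0' * (64 - len(buf)))
--     return words
-- ===== Notes on version B (the rewrite author's own statement) =====
-- stated objective: alternative
-- what changed: B replaces A's index-range loop with per-chunk slicing and an in-loop ljust by a single character-streaming pass that accumulates characters into a buffer, flushing a word whenever the buffer reaches 64 and padding the leftover buffer once at the end.
import Mathlib
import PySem

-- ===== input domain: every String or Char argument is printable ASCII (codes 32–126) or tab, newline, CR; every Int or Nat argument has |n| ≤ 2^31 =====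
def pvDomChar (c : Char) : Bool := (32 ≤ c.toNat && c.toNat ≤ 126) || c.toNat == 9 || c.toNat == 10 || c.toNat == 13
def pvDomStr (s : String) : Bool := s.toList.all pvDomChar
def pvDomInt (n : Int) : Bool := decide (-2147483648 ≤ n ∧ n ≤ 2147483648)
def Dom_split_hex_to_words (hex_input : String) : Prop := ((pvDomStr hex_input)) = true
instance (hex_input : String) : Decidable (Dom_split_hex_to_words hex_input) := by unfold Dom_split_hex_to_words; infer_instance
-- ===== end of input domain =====

-- B replaces A's index loop over 64-char slices (with in-loop ljust) by a single
-- character-streaming pass with a buffer accumulator (objective: alternative).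

-- ===== PORT A =====
-- word.ljust(64, '0') is ported by hand as word ++ replicate (64 - len) '0' under
-- the guard len < 64 (exact: Python's ljust returns word unchanged when len ≥ width).
def split_hex_to_words (hex_input : String) : List String :=
  let s0 := hex_input.toList
  let s1 := if PySem.Chars.startswith s0 ['0','x'] then PySem.List.slice s0 (some 2) none else s0
  let s2 := if s1.length % 2 = 1 then '0' :: s1 else s1
  (PySem.List.pyRange 0 (s2.length : Int) 64).foldl (fun words i =>
      let word := PySem.List.slice s2 (some i) (some (i + 64))
      let word := if word.length < 64 then word ++ List.replicate (64 - word.length) '0' else word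
      words ++ [String.ofList ('0' :: 'x' :: word)]) []

-- ===== PORT B =====
-- B-side helper: one step of the streaming loop (state = (words, buf))
def pvStep (st : List String × List Char) (ch : Char) : List String × List Char :=
  let buf := st.2 ++ [ch]
  if buf.length = 64 then (st.1 ++ [String.ofList ('0' :: 'x' :: buf)], []) else (st.1, buf)

def split_hex_to_words_alt (hex_input : String) : List String :=
  let s0 := hex_input.toList
  let s1 := if PySem.Chars.startswith s0 ['0','x'] then PySem.List.slice s0 (some 2) none else s0
  let s2 := if s1.length % 2 = 1 then '0' :: s1 else s1
  let st := s2.foldl pvStep ([], [])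
  if st.2 ≠ [] then
    st.1 ++ [String.ofList ('0' :: 'x' :: (st.2 ++ List.replicate (64 - st.2.length) '0'))]
  else st.1

-- ===== PRECONDITION & SPEC =====
def Spec_split_hex_to_words (hex_input : String) (out : List String) : Prop := out = split_hex_to_words_alt hex_input
instance (hex_input : String) (out : List String) : Decidable (Spec_split_hex_to_words hex_input out) := by unfold Spec_split_hex_to_words; infer_instance

-- ===== CLAIM (what is proved, stated in full; the proofs are below) =====
def Claim_equal_split_hex_to_words : Prop := ∀ (hex_input : String), Dom_split_hex_to_words hex_input → Spec_split_hex_to_words hex_input (split_hex_to_words hex_input)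

-- ===== LEMMAS AND PROOFS =====

-- common reference shape: the list of padded 64-char words of s
def chunksPad (s : List Char) : List String :=
  if _h : s = [] then []
  else
    let w := s.take 64
    String.ofList ('0' :: 'x' :: (w ++ List.replicate (64 - w.length) '0')) :: chunksPad (s.drop 64)
termination_by s.length
decreasing_by
  cases s with
  | nil => simp_all
  | cons a t => simp

-- B side -------------------------------------------------------------

lemma foldl_step_small (c : List Char) : ∀ (ws : List String) (buf : List Char),
    buf.length + c.length < 64 → List.foldl pvStep (ws, buf) c = (ws, buf ++ c) := by
  induction c with
  | nil => intro ws buf _; simp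
  | cons x xs ih =>
    intro ws buf h
    simp only [List.foldl_cons]
    have hx : pvStep (ws, buf) x = (ws, buf ++ [x]) := by
      unfold pvStep; simp at h ⊢; omega
    rw [hx, ih ws (buf ++ [x]) (by simp at h ⊢; omega)]
    simp

lemma foldl_step_full (c : List Char) : ∀ (ws : List String) (buf : List Char),
    buf.length + c.length = 64 → c ≠ [] →
    List.foldl pvStep (ws, buf) c = (ws ++ [String.ofList ('0' :: 'x' :: (buf ++ c))], []) := by
  induction c with
  | nil => intro ws buf h hne; exact absurd rfl hne
  | cons x xs ih =>
    intro ws buf h _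
    simp only [List.foldl_cons]
    by_cases hxs : xs = []
    · subst hxs
      have hb : (buf ++ [x]).length = 64 := by simp at h ⊢; omega
      unfold pvStep
      simp only [hb]
      simp
    · have hx : pvStep (ws, buf) x = (ws, buf ++ [x]) := by
        unfold pvStep
        have : xs.length ≠ 0 := by simpa [List.length_eq_zero_iff] using hxs
        simp at h ⊢; omega
      rw [hx, ih ws (buf ++ [x]) (by simp at h ⊢; omega) hxs]
      simp

def pvFinal (st : List String × List Char) : List String :=
  if st.2 ≠ [] then
    st.1 ++ [String.ofList ('0' :: 'x' :: (st.2 ++ List.replicate (64 - st.2.length) '0'))]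
  else st.1

lemma stream_eq_chunksPad (n : Nat) : ∀ (s : List Char), s.length = n → ∀ (ws : List String),
    pvFinal (List.foldl pvStep (ws, []) s) = ws ++ chunksPad s := by
  induction n using Nat.strong_induction_on with
  | _ n ih =>
    intro s hs ws
    by_cases hnil : s = []
    · subst hnil; simp [pvFinal, chunksPad]
    · have hsplit : List.foldl pvStep (ws, []) s
          = List.foldl pvStep (List.foldl pvStep (ws, []) (s.take 64)) (s.drop 64) := by
        rw [← List.foldl_append, List.take_append_drop]
      rw [hsplit]
      by_cases hbig : 64 ≤ s.length
      · have ht : (s.take 64).length = 64 := by simp; omega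
        rw [foldl_step_full _ ws [] (by simpa using ht)
              (by intro h; rw [h] at ht; simp at ht)]
        rw [ih (s.drop 64).length (by simp; omega) _ rfl]
        conv_rhs => rw [chunksPad]
        simp only [hnil, dif_neg, not_false_iff]
        simp [List.length_take, show min 64 s.length = 64 from by omega]
      · rw [foldl_step_small _ ws [] (by simp; omega)]
        have hdnil : s.drop 64 = [] := by rw [List.drop_eq_nil_iff]; omega
        have htake : s.take 64 = s := List.take_of_length_le (by omega)
        conv_rhs => rw [chunksPad]
        simp only [hnil, dif_neg, not_false_iff]
        rw [hdnil, chunksPad]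
        simp [pvFinal, hnil, htake]

-- A side -------------------------------------------------------------

lemma ifpad (w : List Char) (h : w.length ≤ 64) :
    (if w.length < 64 then w ++ List.replicate (64 - w.length) '0' else w)
      = w ++ List.replicate (64 - w.length) '0' := by
  split_ifs with hlt
  · rfl
  · have : w.length = 64 := by omega
    simp [this]

lemma mapA_eq_chunksPad (m : Nat) : ∀ (s : List Char),
    s.length ≤ 64 * m → 64 * m < s.length + 64 →
    (List.range m).map (fun k =>
        String.ofList ('0' :: 'x' ::
          (List.take 64 (List.drop (64 * k) s) ++
            List.replicate (64 - (List.take 64 (List.drop (64 * k) s)).length) '0')))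
      = chunksPad s := by
  induction m with
  | zero =>
    intro s h1 _
    have : s = [] := by
      rw [← List.length_eq_zero_iff]; omega
    simp [this, chunksPad]
  | succ m ih =>
    intro s h1 h2
    have hnil : s ≠ [] := by
      intro h; subst h; simp only [List.length_nil] at h2; omega
    rw [List.range_succ_eq_map, List.map_cons, List.map_map]
    rw [chunksPad]
    simp only [hnil, dif_neg, not_false_iff]
    refine List.cons_eq_cons.mpr ⟨?_, ?_⟩
    · simp
    · have hdd : ∀ k : Nat, List.drop (64 * (k + 1)) s = List.drop (64 * k) (List.drop 64 s) := by
        intro k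
        rw [List.drop_drop]
        congr 1
        ring
      have : ((fun k =>
          String.ofList ('0' :: 'x' ::
            (List.take 64 (List.drop (64 * k) s) ++
              List.replicate (64 - (List.take 64 (List.drop (64 * k) s)).length) '0'))) ∘ Nat.succ)
          = (fun k =>
            String.ofList ('0' :: 'x' ::
              (List.take 64 (List.drop (64 * k) (List.drop 64 s)) ++
                List.replicate (64 - (List.take 64 (List.drop (64 * k) (List.drop 64 s))).length) '0'))) := by
        funext k
        simp only [Function.comp]
        rw [show Nat.succ k = k + 1 from rfl, hdd k]
      rw [this]
      exact ih (List.drop 64 s) (by simp; omega) (by simp; omega)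

-- full A-core = chunksPad
lemma acore_eq (s : List Char) :
    (PySem.List.pyRange 0 (s.length : Int) 64).foldl (fun words i =>
        let word := PySem.List.slice s (some i) (some (i + 64))
        let word := if word.length < 64 then word ++ List.replicate (64 - word.length) '0' else word
        words ++ [String.ofList ('0' :: 'x' :: word)]) []
      = chunksPad s := by
  set n := s.length with hn
  rw [PySem.List.foldl_append_singleton_eq_map]
  rw [PySem.List.pyRange_of_pos 0 (n : Int) (by norm_num)]
  rw [List.map_map]
  have hm : (if (0:Int) < (n:Int) then ((((n:Int)) - 0 + 64 - 1) / 64).toNat else 0)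
      = (n + 63) / 64 := by
    by_cases h0 : n = 0
    · simp [h0]
    · rw [if_pos (by omega)]; omega
  rw [hm]
  have hmap : ∀ k ∈ List.range ((n + 63) / 64),
      ((fun i =>
          let word := PySem.List.slice s (some i) (some (i + 64))
          let word := if word.length < 64 then word ++ List.replicate (64 - word.length) '0' else word
          String.ofList ('0' :: 'x' :: word)) ∘ (fun k : Nat => (0:Int) + 64 * (k:Int))) k
        = String.ofList ('0' :: 'x' ::
            (List.take 64 (List.drop (64 * k) s) ++
              List.replicate (64 - (List.take 64 (List.drop (64 * k) s)).length) '0')) := by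
    intro k _
    simp only [Function.comp]
    have hc0 : (0 : Int) + 64 * (k : Int) = ((64 * k : Nat) : Int) := by push_cast; ring
    have hslice : PySem.List.slice s (some ((0:Int) + 64 * (k:Int))) (some ((0:Int) + 64 * (k:Int) + 64))
        = List.take 64 (List.drop (64 * k) s) := by
      rw [hc0, show ((64*k : Nat) : Int) + 64 = ((64*k : Nat) : Int) + ((64 : Nat) : Int) from by norm_num]
      exact PySem.List.slice_natCast_add ..
    simp only [hslice]
    rw [ifpad _ (by simp)]
  rw [List.map_congr_left hmap]
  exact mapA_eq_chunksPad ((n + 63) / 64) s (by omega) (by omega)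

-- ===== VERDICT (by name: the statement is the Claim_ definition above) =====
theorem split_hex_to_words_spec : Claim_equal_split_hex_to_words := by
  intro hex_input _
  unfold Spec_split_hex_to_words split_hex_to_words split_hex_to_words_alt
  simp only []
  rw [acore_eq]
  exact (stream_eq_chunksPad _ _ rfl []).symm
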